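-- pv_equiv track=rewrite | github.com/ElCresp0/Sudoku-AI | Neurals/scripts/validate_solution.py | mistakes_made_sudoku
-- ===== SOURCE A (Python) =====
-- def mistakes_made_sudoku(board):
--     mistakes = 0
--     for i in range(len(board)):
--         row = [1, 2, 3, 4, 5, 6, 7, 8, 9]
--         col = [1, 2, 3, 4, 5, 6, 7, 8, 9]
--         for j in range(len(board)):
--             if board[i][j] in row:
--                 row.remove(board[i][j])
--             else:
--                 mistakes += 1
--             if board[j][i] in col:
--                 col.remove(board[j][i])
--             else:
--                 mistakes += 1
--
--     b = [1, 2, 3, 4, 5, 6, 7, 8, 9]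
--     f = []
--     for i in range(9):
--         f.append(b.copy())
--     for i in range(len(board)):
--         for j in range(len(board)):
--             if board[i][j] in f[int(i / 3) * 3 + int(j / 3)]:
--                 f[int(i / 3) * 3 + int(j / 3)].remove(board[i][j])
--             else:
--                 mistakes += 1
--     return mistakes
-- ===== SOURCE B (Python) =====
-- def mistakes_made_sudoku(board):
--     n = len(board)
--     mistakes = 0
--     for i in range(n):
--         rowset = {board[i][j] for j in range(n) if 1 <= board[i][j] <= 9}
--         colset = {board[j][i] for j in range(n) if 1 <= board[j][i] <= 9}
--         mistakes += 2 * n - len(rowset) - len(colset)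
--     boxes = {}
--     for i in range(n):
--         for j in range(n):
--             k = (i // 3) * 3 + j // 3
--             s = boxes.setdefault(k, set())
--             if 1 <= board[i][j] <= 9:
--                 s.add(board[i][j])
--     mistakes += n * n - sum(len(s) for s in boxes.values())
--     return mistakes
-- ===== Notes on version B (the rewrite author's own statement) =====
-- stated objective: simpler
-- what changed: Replaces the shrinking-pool removal simulation (three mutable candidate lists per group with a per-cell match/mistake branch) by a dedup-then-subtract count: for each row, column and box collect the set of in-range values and add group-size minus set-size to the mistake count.
import Mathlib
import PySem

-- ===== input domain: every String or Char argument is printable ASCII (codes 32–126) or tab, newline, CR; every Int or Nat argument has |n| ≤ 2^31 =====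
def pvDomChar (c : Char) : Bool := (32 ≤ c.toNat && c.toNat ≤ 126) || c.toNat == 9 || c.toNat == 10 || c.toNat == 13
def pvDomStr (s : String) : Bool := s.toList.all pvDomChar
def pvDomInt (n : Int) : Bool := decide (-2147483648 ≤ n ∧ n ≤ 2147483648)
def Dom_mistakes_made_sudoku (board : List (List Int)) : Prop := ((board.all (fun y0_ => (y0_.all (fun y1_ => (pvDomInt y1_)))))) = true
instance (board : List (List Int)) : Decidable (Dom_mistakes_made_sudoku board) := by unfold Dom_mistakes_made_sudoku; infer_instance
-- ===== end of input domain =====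

-- B replaces A's shrinking-pool removal simulation by a per-group "group size minus number of
-- distinct in-range values" count (simpler; same asymptotic cost).

-- ===== PORT A =====
-- board[i][j] for loop indices i, j (exact under Pre_, where every access is in range)
def pvCellA (board : List (List Int)) (i j : Nat) : Int := (board.getD i []).getD j 0

-- one Python step `if v in pool: pool.remove(v) else: mistakes += 1` on state (pool, mistakes)
def pvPoolStep (st : List Int × Int) (v : Int) : List Int × Int :=
  if st.1.contains v then ((PySem.List.remove? st.1 v).getD st.1, st.2) else (st.1, st.2 + 1)

-- body of A's inner j-loop: row step with board[i][j], then col step with board[j][i]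
def pvRC2 (st : List Int × List Int × Int) (v w : Int) : List Int × List Int × Int :=
  let s1 := pvPoolStep (st.1, st.2.2) v
  let s2 := pvPoolStep (st.2.1, s1.2) w
  (s1.1, s2.1, s2.2)

-- body of A's box loop on state (f, mistakes), for the cell (box index, value)
def pvBoxStepP (st : List (List Int) × Int) (c : Nat × Int) : List (List Int) × Int :=
  let pool := st.1.getD c.1 []
  if pool.contains c.2 then (st.1.set c.1 ((PySem.List.remove? pool c.2).getD pool), st.2)
  else (st.1, st.2 + 1)

def mistakes_made_sudoku (board : List (List Int)) : Int :=
  let n := board.length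
  let m1 := (List.range n).foldl (fun m i =>
    ((List.range n).foldl
        (fun st j => pvRC2 st (pvCellA board i j) (pvCellA board j i))
        (([1, 2, 3, 4, 5, 6, 7, 8, 9] : List Int),
         ([1, 2, 3, 4, 5, 6, 7, 8, 9] : List Int), m)).2.2) 0
  let b : List Int := [1, 2, 3, 4, 5, 6, 7, 8, 9]
  let f := (List.range 9).foldl (fun f _ => f ++ [b]) []
  let res := (List.range n).foldl (fun st i =>
    (List.range n).foldl
      (fun st j => pvBoxStepP st (i / 3 * 3 + j / 3, pvCellA board i j)) st) (f, m1)
  res.2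

-- ===== PORT B =====
-- the membership test `board[i][j] in valid` of Source B, i.e. 1 <= v <= 9
def pvValid (v : Int) : Bool := decide (1 ≤ v) && decide (v ≤ 9)

-- body of B's box loop: s = boxes.setdefault(k, set()); if valid: s.add(v)
def pvBStepP (d : PySem.Dict Nat (PySem.Set Int)) (c : Nat × Int) : PySem.Dict Nat (PySem.Set Int) :=
  let d1 := d.setdefault c.1 PySem.Set.empty
  let s := d1.getD c.1 PySem.Set.empty
  if pvValid c.2 then d1.insert c.1 (PySem.Set.add s c.2) else d1

def mistakes_made_sudoku_alt (board : List (List Int)) : Int :=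
  let n := board.length
  let m1 := (List.range n).foldl (fun m i =>
    let rowset : PySem.Set Int := PySem.Set.ofList
      (((List.range n).filter (fun j => pvValid (pvCellA board i j))).map (fun j => pvCellA board i j))
    let colset : PySem.Set Int := PySem.Set.ofList
      (((List.range n).filter (fun j => pvValid (pvCellA board j i))).map (fun j => pvCellA board j i))
    m + 2 * (n : Int) - rowset.length - colset.length) 0
  let boxes := (List.range n).foldl (fun d i =>
    (List.range n).foldl
      (fun d j => pvBStepP d (i / 3 * 3 + j / 3, pvCellA board i j)) d) PySem.Dict.empty
  m1 + (n : Int) * n - (boxes.values.map (fun s => (s.length : Int))).sum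

-- ===== PRECONDITION & SPEC =====
-- Pre_ is exactly where Python A returns: on a board with more than 9 rows the box loop overruns
-- A's fixed list of 9 box pools (IndexError), and a row shorter than the number of rows gives
-- an IndexError when it is indexed.
def Pre_mistakes_made_sudoku (board : List (List Int)) : Prop :=
  board.length ≤ 9 ∧ ∀ r ∈ board, board.length ≤ r.length
instance (board : List (List Int)) : Decidable (Pre_mistakes_made_sudoku board) := by
  unfold Pre_mistakes_made_sudoku; infer_instance

def pvWitness_mistakes_made_sudoku : List (List Int) :=
  [[1, 2, 3, 4, 5, 6, 7, 8, 9], [1, 2, 3, 4, 5, 6, 7, 8, 9], [1, 2, 3, 4, 5, 6, 7, 8, 9],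
   [1, 2, 3, 4, 5, 6, 7, 8, 9], [1, 2, 3, 4, 5, 6, 7, 8, 9], [1, 2, 3, 4, 5, 6, 7, 8, 9],
   [1, 2, 3, 4, 5, 6, 7, 8, 9], [1, 2, 3, 4, 5, 6, 7, 8, 9], [1, 2, 3, 4, 5, 6, 7, 8, 9]]

def Spec_mistakes_made_sudoku (board : List (List Int)) (out : Int) : Prop :=
  out = mistakes_made_sudoku_alt board
instance (board : List (List Int)) (out : Int) : Decidable (Spec_mistakes_made_sudoku board out) := by
  unfold Spec_mistakes_made_sudoku; infer_instance

-- ===== CLAIM (what is proved, stated in full; the proofs are below) =====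
def Claim_equal_mistakes_made_sudoku : Prop := ∀ (board : List (List Int)),
  Dom_mistakes_made_sudoku board → Pre_mistakes_made_sudoku board →
  Spec_mistakes_made_sudoku board (mistakes_made_sudoku board)

-- ===== LEMMAS AND PROOFS =====

def pvPools (s : PySem.Set Int) : List Int :=
  ([1, 2, 3, 4, 5, 6, 7, 8, 9] : List Int).filter (fun v => !PySem.Set.contains s v)
lemma pv_mem_pools (s : PySem.Set Int) (v : Int) :
    v ∈ pvPools s ↔ (pvValid v = true ∧ v ∉ s) := by
  simp [pvPools, pvValid]
  intro _
  constructor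
  · rintro (h|h|h|h|h|h|h|h|h) <;> omega
  · omega
lemma pv_pools_nodup (s : PySem.Set Int) : (pvPools s).Nodup :=
  List.Nodup.filter _ (by decide)
lemma pv_pools_erase (s : PySem.Set Int) (v : Int) :
    (pvPools s).erase v = pvPools (PySem.Set.add s v) := by
  rw [(pv_pools_nodup s).erase_eq_filter]
  unfold pvPools
  rw [List.filter_filter]
  apply List.filter_congr
  intro x hx
  simp [PySem.Set.add_eq_ite, PySem.Set.contains_iff]
  by_cases hxv : x = v <;> by_cases hvs : v ∈ s <;> simp [hxv, hvs]

lemma pvPool_add (vs : List Int) (p : List Int) (m : Int) :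
    vs.foldl pvPoolStep (p, m)
      = ((vs.foldl pvPoolStep (p, 0)).1, m + (vs.foldl pvPoolStep (p, 0)).2) := by
  induction vs generalizing p m with
  | nil => simp
  | cons v vs ih =>
    simp only [List.foldl_cons]
    by_cases h : p.contains v
    · simp only [pvPoolStep, h, if_pos]
      rw [ih _ m, ih _ 0]
    · simp only [pvPoolStep, h, if_neg, Bool.false_eq_true, not_false_iff]
      rw [ih _ (m+1), ih _ (0+1)]
      simp only [Prod.mk.injEq, true_and]
      ring

lemma pv_pool_fold (vs : List Int) (s : PySem.Set Int) (m : Int) :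
    (vs.foldl pvPoolStep (pvPools s, m)).2
      = m + (vs.length : Int) - ((PySem.Set.update s (vs.filter pvValid)).length : Int)
          + (s.length : Int) := by
  induction vs generalizing s m with
  | nil => simp [PySem.Set.update]
  | cons v vs ih =>
    simp only [List.foldl_cons]
    by_cases hval : pvValid v
    · by_cases hvs : v ∈ s
      · have hnc : (pvPools s).contains v = false := by
          simp [List.contains_iff_mem, pv_mem_pools, hval, hvs]
        simp only [pvPoolStep, hnc, Bool.false_eq_true, if_neg, not_false_iff]
        rw [ih s (m+1)]
        have : PySem.Set.update s (List.filter pvValid (v :: vs))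
            = PySem.Set.update s (vs.filter pvValid) := by
          simp [List.filter_cons, hval, PySem.Set.update_cons, PySem.Set.add_of_mem hvs]
        rw [this]
        simp
        ring
      · have hc : (pvPools s).contains v = true := by
          simp [List.contains_iff_mem, pv_mem_pools, hval, hvs]
        have hrm : PySem.List.remove? (pvPools s) v = some ((pvPools s).erase v) :=
          PySem.List.remove?_eq_some_erase _ v ((pv_mem_pools s v).mpr ⟨hval, hvs⟩)
        simp only [pvPoolStep, hc, if_pos, hrm, Option.getD_some, pv_pools_erase]
        rw [ih (PySem.Set.add s v) m]
        have h1 : PySem.Set.update s (List.filter pvValid (v :: vs))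
            = PySem.Set.update (PySem.Set.add s v) (vs.filter pvValid) := by
          simp [List.filter_cons, hval, PySem.Set.update_cons]
        rw [h1]
        have h2 : (PySem.Set.add s v).length = s.length + 1 := by
          simp [PySem.Set.add_of_not_mem hvs]
        rw [h2]
        simp only [List.length_cons]
        push_cast
        ring
    · have hnc : (pvPools s).contains v = false := by
        simp [List.contains_iff_mem, pv_mem_pools, hval]
      simp only [pvPoolStep, hnc, Bool.false_eq_true, if_neg, not_false_iff]
      rw [ih s (m+1)]
      have : List.filter pvValid (v :: vs) = vs.filter pvValid := by
        simp [List.filter_cons, hval]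
      rw [this]
      simp
      ring

lemma pvPoolStep_pool (p : List Int) (m m' : Int) (v : Int) :
    (pvPoolStep (p, m) v).1 = (pvPoolStep (p, m') v).1 := by
  unfold pvPoolStep; split_ifs <;> rfl

lemma pvPoolStep_mist (p : List Int) (m : Int) (v : Int) :
    (pvPoolStep (p, m) v).2 = m + (pvPoolStep (p, 0) v).2 := by
  unfold pvPoolStep; split_ifs <;> simp

lemma pvPool_add' (vs : List Int) (st : List Int × Int) :
    vs.foldl pvPoolStep st
      = ((vs.foldl pvPoolStep (st.1, 0)).1, st.2 + (vs.foldl pvPoolStep (st.1, 0)).2) := by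
  obtain ⟨p, m⟩ := st; exact pvPool_add vs p m

lemma pv_rc_split (js : List Nat) (a b : Nat → Int) (r c : List Int) (m : Int) :
    (js.foldl (fun st j => pvRC2 st (a j) (b j)) (r, c, m)).2.2
      = m + ((js.map a).foldl pvPoolStep (r, 0)).2 + ((js.map b).foldl pvPoolStep (c, 0)).2 := by
  induction js generalizing r c m with
  | nil => simp
  | cons j js ih =>
    simp only [List.foldl_cons, List.map_cons]
    rw [ih]
    rw [pvPool_add' (js.map a), pvPool_add' (js.map b)]
    unfold pvRC2
    simp only []
    rw [pvPoolStep_mist c, pvPoolStep_mist r]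
    rw [pvPoolStep_pool r m 0, pvPoolStep_pool c (m + (pvPoolStep (r, 0) (a j)).2) 0]
    rw [pvPool_add' (js.map a) (pvPoolStep (r, 0) (a j)),
        pvPool_add' (js.map b) (pvPoolStep (c, 0) (b j))]
    ring

def pvSumLens (d : PySem.Dict Nat (PySem.Set Int)) : Int :=
  (d.values.map (fun s => (s.length : Int))).sum

lemma pv_sum_replace (l : List (Nat × PySem.Set Int)) (k : Nat) (w s : PySem.Set Int)
    (hnd : (l.map (·.1)).Nodup) (hmem : (k, s) ∈ l) :
    ((l.map (fun p => if p.1 == k then (k, w) else p)).map (fun p => (p.2.length : Int))).sum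
      = (l.map (fun p => (p.2.length : Int))).sum - (s.length : Int) + (w.length : Int) := by
  induction l with
  | nil => simp at hmem
  | cons p l ih =>
    simp only [List.map_cons, List.nodup_cons, List.sum_cons] at hnd ⊢
    rcases List.mem_cons.mp hmem with h | h
    · subst h
      simp only [BEq.rfl, if_pos]
      have : ∀ q ∈ l, (if q.1 == k then (k, w) else q) = q := by
        intro q hq
        have hq1 : q.1 ≠ k := by
          intro e
          exact hnd.1 (e ▸ (List.mem_map_of_mem hq : q.1 ∈ l.map (·.1)))
        simp [hq1]
      rw [List.map_congr_left this]
      simp only [List.map_id']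
      ring
    · have hpk : p.1 ≠ k := by
        rintro e
        exact hnd.1 (e ▸ (List.mem_map_of_mem h : (k, s).1 ∈ l.map (·.1)))
      have heq : (p.1 == k) = false := by simpa using hpk
      simp only [heq, Bool.false_eq_true, if_neg, not_false_iff]
      rw [ih hnd.2 h]
      ring

lemma pv_sum_insert (d : PySem.Dict Nat (PySem.Set Int)) (k : Nat) (w s : PySem.Set Int)
    (hnd : d.keys.Nodup) (hget : d.get? k = some s) :
    pvSumLens (d.insert k w) = pvSumLens d - (s.length : Int) + (w.length : Int) := by
  have hc : d.contains k = true := by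
    rw [PySem.Dict.contains_eq_isSome_get?, hget]; rfl
  unfold pvSumLens
  have hmem := PySem.Dict.mem_items_of_get?_eq_some d hget
  have hv : ∀ (e : PySem.Dict Nat (PySem.Set Int)), e.values = e.items.map (·.2) := fun _ => rfl
  rw [hv, hv, PySem.Dict.items_insert_of_contains d w hc]
  simpa [List.map_map, Function.comp] using pv_sum_replace d.items k w s hnd hmem

lemma pv_sum_setdefault (d : PySem.Dict Nat (PySem.Set Int)) (k : Nat) :
    pvSumLens (d.setdefault k PySem.Set.empty) = pvSumLens d := by
  by_cases hc : d.contains k = true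
  · rw [PySem.Dict.setdefault_of_contains d _ hc]
  · rw [PySem.Dict.setdefault_of_not_contains d _ (by simpa using hc)]
    unfold pvSumLens
    have hv : ∀ (e : PySem.Dict Nat (PySem.Set Int)), e.values = e.items.map (·.2) := fun _ => rfl
    rw [hv, hv, PySem.Dict.items_insert_of_not_contains d _ (by simpa using hc)]
    simp [PySem.Set.empty]

lemma pv_getD_set_self (f : List (List Int)) (k : Nat) (x : List Int) (h : k < f.length) :
    (f.set k x).getD k [] = x := by
  simp [List.getD_eq_getElem?_getD, List.getElem?_set_self, h]

lemma pv_getD_set_ne (f : List (List Int)) (k k' : Nat) (x : List Int) (h : k' ≠ k) :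
    (f.set k x).getD k' [] = f.getD k' [] := by
  simp [List.getD_eq_getElem?_getD, List.getElem?_set_ne (by omega : k ≠ k')]

lemma pv_box_sim (cs : List (Nat × Int)) (f : List (List Int))
    (d : PySem.Dict Nat (PySem.Set Int)) (m : Int)
    (hk : ∀ c ∈ cs, c.1 < 9) (hlen : f.length = 9) (hnd : d.keys.Nodup)
    (hinv : ∀ k, k < 9 → f.getD k [] = pvPools (d.getD k PySem.Set.empty)) :
    (cs.foldl pvBoxStepP (f, m)).2
      = m + (cs.length : Int) + pvSumLens d - pvSumLens (cs.foldl pvBStepP d) := by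
  induction cs generalizing f d m with
  | nil => simp
  | cons c cs ih =>
    obtain ⟨k, v⟩ := c
    have hk9 : k < 9 := hk _ (List.mem_cons_self ..)
    have hkcs : ∀ c ∈ cs, c.1 < 9 := fun c hc => hk c (List.mem_cons_of_mem _ hc)
    set s := d.getD k PySem.Set.empty with hs
    have hpool : f.getD k [] = pvPools s := hinv k hk9
    set d1 := d.setdefault k PySem.Set.empty with hd1
    have hnd1 : d1.keys.Nodup := by
      rw [hd1]
      by_cases hc : d.contains k = true
      · rwa [PySem.Dict.setdefault_of_contains d _ hc]
      · rw [PySem.Dict.setdefault_of_not_contains d _ (by simpa using hc)]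
        exact PySem.Dict.nodup_keys_insert _ _ _ hnd
    have hget1 : d1.get? k = some s := by
      rw [hd1, PySem.Dict.get?_setdefault_self, ← PySem.Dict.getD_eq_get?_getD]
    have hgd1 : ∀ k', d1.getD k' PySem.Set.empty = d.getD k' PySem.Set.empty := by
      intro k'
      by_cases hkk : k' = k
      · rw [hkk, hd1, PySem.Dict.getD_setdefault_self]
      · rw [hd1, PySem.Dict.getD_eq_get?_getD, PySem.Dict.get?_setdefault_of_ne _ _ hkk,
            ← PySem.Dict.getD_eq_get?_getD]
    have hsum1 : pvSumLens d1 = pvSumLens d := pv_sum_setdefault d k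
    simp only [List.foldl_cons]
    by_cases hval : pvValid v = true
    · by_cases hvs : v ∈ s
      · -- valid, already seen: mistake in A, set unchanged in B
        have hnc : (f.getD k []).contains v = false := by
          rw [hpool]; simp [pv_mem_pools, hval, hvs]
        have hA : pvBoxStepP (f, m) (k, v) = (f, m + 1) := by
          simp only [pvBoxStepP]
          rw [hnc]
          simp
        have hB : pvBStepP d (k, v) = d1.insert k s := by
          simp only [pvBStepP, hval, if_pos]
          rw [← hd1, hgd1 k, ← hs, PySem.Set.add_of_mem hvs]
        rw [hA, hB]
        rw [ih f (d1.insert k s) (m + 1) hkcs hlen (PySem.Dict.nodup_keys_insert _ _ _ hnd1)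
          (by
            intro k' hk'
            by_cases hkk : k' = k
            · rw [hkk, PySem.Dict.getD_insert_self, hinv k hk9]
            · rw [PySem.Dict.getD_insert_of_ne _ _ _ hkk, hgd1 k', hinv k' hk'])]
        have : pvSumLens (d1.insert k s) = pvSumLens d := by
          rw [pv_sum_insert d1 k s s hnd1 hget1, hsum1]; ring
        rw [this]
        simp only [List.length_cons]
        push_cast
        ring
      · -- valid, new: removed in A, added in B
        have hc : (f.getD k []).contains v = true := by
          rw [hpool]; simp [pv_mem_pools, hval, hvs]
        have hrm : PySem.List.remove? (f.getD k []) v = some ((pvPools s).erase v) := by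
          rw [hpool]
          exact PySem.List.remove?_eq_some_erase _ v ((pv_mem_pools s v).mpr ⟨hval, hvs⟩)
        have hA : pvBoxStepP (f, m) (k, v) = (f.set k (pvPools (PySem.Set.add s v)), m) := by
          simp only [pvBoxStepP]
          rw [hc, hrm]
          simp [pv_pools_erase]
        have hB : pvBStepP d (k, v) = d1.insert k (PySem.Set.add s v) := by
          simp only [pvBStepP, hval, if_pos]
          rw [← hd1, hgd1 k, ← hs]
        rw [hA, hB]
        rw [ih _ _ m hkcs (by simpa using hlen) (PySem.Dict.nodup_keys_insert _ _ _ hnd1)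
          (by
            intro k' hk'
            by_cases hkk : k' = k
            · rw [hkk, PySem.Dict.getD_insert_self, pv_getD_set_self _ _ _ (by omega)]
            · rw [PySem.Dict.getD_insert_of_ne _ _ _ hkk, hgd1 k',
                  pv_getD_set_ne _ _ _ _ hkk, hinv k' hk'])]
        have : pvSumLens (d1.insert k (PySem.Set.add s v)) = pvSumLens d + 1 := by
          rw [pv_sum_insert d1 k _ s hnd1 hget1, hsum1, PySem.Set.add_of_not_mem hvs]
          simp
          ring
        rw [this]
        simp only [List.length_cons]
        push_cast
        ring
    · -- invalid value: mistake in A, nothing recorded in B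
      have hnc : (f.getD k []).contains v = false := by
        rw [hpool]
        simp only [List.contains_eq_mem, decide_eq_false_iff_not]
        intro hmem
        exact hval ((pv_mem_pools s v).mp hmem).1
      have hA : pvBoxStepP (f, m) (k, v) = (f, m + 1) := by
        simp only [pvBoxStepP]
        rw [hnc]
        simp
      have hB : pvBStepP d (k, v) = d1 := by
        simp [pvBStepP, hval]
        rfl
      rw [hA, hB]
      rw [ih f d1 (m + 1) hkcs hlen hnd1
        (by intro k' hk'; rw [hgd1 k', hinv k' hk'])]
      rw [hsum1]
      simp only [List.length_cons]
      push_cast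
      ring

lemma pv_foldl_flat {γ : Type} (l : List Nat) (g : Nat → List (Nat × Int))
    (f : γ → (Nat × Int) → γ) (init : γ) :
    (l.flatMap g).foldl f init = l.foldl (fun acc a => (g a).foldl f acc) init := by
  induction l generalizing init with
  | nil => rfl
  | cons a l ih => simp [List.flatMap_cons, List.foldl_append, ih]

lemma pv_pools_empty : pvPools PySem.Set.empty = ([1, 2, 3, 4, 5, 6, 7, 8, 9] : List Int) := by decide

-- one row/column pass of A equals B's closed count
lemma pv_row_eq (board : List (List Int)) (n : Nat) (i : Nat) (m : Int) :
    ((List.range n).foldl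
        (fun st j => pvRC2 st (pvCellA board i j) (pvCellA board j i))
        (([1, 2, 3, 4, 5, 6, 7, 8, 9] : List Int),
         ([1, 2, 3, 4, 5, 6, 7, 8, 9] : List Int), m)).2.2
      = m + 2 * (n : Int)
          - ((PySem.Set.ofList
              (((List.range n).filter (fun j => pvValid (pvCellA board i j))).map
                (fun j => pvCellA board i j))).length : Int)
          - ((PySem.Set.ofList
              (((List.range n).filter (fun j => pvValid (pvCellA board j i))).map
                (fun j => pvCellA board j i))).length : Int) := by
  rw [pv_rc_split (List.range n) (fun j => pvCellA board i j) (fun j => pvCellA board j i) _ _ m]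
  rw [← pv_pools_empty]
  rw [pv_pool_fold, pv_pool_fold]
  rw [List.filter_map, List.filter_map]
  simp only [PySem.Set.update_nil_left, PySem.Set.empty, List.length_nil, List.length_map,
    List.length_range, Function.comp_def]
  push_cast
  ring

def pvCells (board : List (List Int)) (n : Nat) : List (Nat × Int) :=
  (List.range n).flatMap (fun i =>
    (List.range n).map (fun j => (i / 3 * 3 + j / 3, pvCellA board i j)))

lemma pv_main (board : List (List Int)) (h9 : board.length ≤ 9) :
    mistakes_made_sudoku board = mistakes_made_sudoku_alt board := by
  unfold mistakes_made_sudoku mistakes_made_sudoku_alt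
  simp only []
  set n := board.length with hn
  -- rows and columns
  have hm1 : ((List.range n).foldl (fun m i =>
      ((List.range n).foldl
        (fun st j => pvRC2 st (pvCellA board i j) (pvCellA board j i))
        (([1, 2, 3, 4, 5, 6, 7, 8, 9] : List Int),
         ([1, 2, 3, 4, 5, 6, 7, 8, 9] : List Int), m)).2.2) 0 : Int)
      = (List.range n).foldl (fun m i =>
          m + 2 * (n : Int)
          - ((PySem.Set.ofList
              (((List.range n).filter (fun j => pvValid (pvCellA board i j))).map
                (fun j => pvCellA board i j))).length : Int)
          - ((PySem.Set.ofList
              (((List.range n).filter (fun j => pvValid (pvCellA board j i))).map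
                (fun j => pvCellA board j i))).length : Int)) 0 := by
    apply PySem.List.foldl_congr_mem
    intro m i _
    exact pv_row_eq board n i m
  rw [hm1]
  -- boxes: flatten both nested folds to a fold over the cell list
  have hflatA : ∀ (st : List (List Int) × Int),
      (List.range n).foldl (fun st i =>
        (List.range n).foldl
          (fun st j => pvBoxStepP st (i / 3 * 3 + j / 3, pvCellA board i j)) st) st
        = (pvCells board n).foldl pvBoxStepP st := by
    intro st
    rw [pvCells, pv_foldl_flat]
    apply PySem.List.foldl_congr_mem
    intro acc i _
    exact (List.foldl_map ..).symm
  have hflatB : ∀ (d : PySem.Dict Nat (PySem.Set Int)),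
      (List.range n).foldl (fun d i =>
        (List.range n).foldl
          (fun d j => pvBStepP d (i / 3 * 3 + j / 3, pvCellA board i j)) d) d
        = (pvCells board n).foldl pvBStepP d := by
    intro d
    rw [pvCells, pv_foldl_flat]
    apply PySem.List.foldl_congr_mem
    intro acc i _
    exact (List.foldl_map ..).symm
  rw [hflatA, hflatB]
  have hcellslen : ((pvCells board n).length : Int) = (n : Int) * n := by
    simp [pvCells, List.length_flatMap, List.map_const', List.sum_replicate]
  have hsim := pv_box_sim (pvCells board n)
    ((List.range 9).foldl (fun f _ => f ++ [([1, 2, 3, 4, 5, 6, 7, 8, 9] : List Int)]) [])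
    PySem.Dict.empty
    ((List.range n).foldl (fun m i =>
          m + 2 * (n : Int)
          - ((PySem.Set.ofList
              (((List.range n).filter (fun j => pvValid (pvCellA board i j))).map
                (fun j => pvCellA board i j))).length : Int)
          - ((PySem.Set.ofList
              (((List.range n).filter (fun j => pvValid (pvCellA board j i))).map
                (fun j => pvCellA board j i))).length : Int)) 0)
    (by
      intro c hc
      simp only [pvCells, List.mem_flatMap, List.mem_map, List.mem_range] at hc
      obtain ⟨i, hi, j, hj, rfl⟩ := hc
      simp only []
      omega)
    (by decide) (by decide) (by decide)
  rw [hsim, hcellslen]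
  have : pvSumLens PySem.Dict.empty = 0 := rfl
  rw [this]
  simp only [pvSumLens, add_zero]

-- ===== VERDICT (by name: the statement is the Claim_ definition above) =====
theorem mistakes_made_sudoku_spec : Claim_equal_mistakes_made_sudoku := by
  intro board _ hpre
  unfold Spec_mistakes_made_sudoku
  exact pv_main board hpre.1
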